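-- pv_equiv track=rewrite | github.com/jooeun921/Algorithm_study | 백준/Silver/1072. 게임/게임.py | min_games_needed
-- ===== SOURCE A (Python) =====
-- def min_games_needed(x, y):
--     z = (y * 100) // x
--
--     if z >= 99:
--         return -1
--
--     left, right = 1, x
--     answer = -1
--
--     while left <= right:
--         mid = (left + right) // 2
--         new_z = ((y + mid) * 100) // (x + mid)
--
--         if new_z > z:
--             answer = mid
--             right = mid - 1
--         else:
--             left = mid + 1
--
--     return answer
-- ===== SOURCE B (Python) =====
-- def min_games_needed(x, y):
--     z = (y * 100) // x
--     if z >= 99: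
--         return -1
--     need = (z + 1) * x - 100 * y
--     m = max(1, -(-need // (99 - z)))
--     return m if m <= x else -1
-- ===== Notes on version B (the rewrite author's own statement) =====
-- stated objective: faster
-- what changed: Replaces the binary search over [1,x] with a closed-form integer-ceiling solve of 100(y+m) >= (z+1)(x+m), clamped to >=1 and rejected beyond x.
import Mathlib
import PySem

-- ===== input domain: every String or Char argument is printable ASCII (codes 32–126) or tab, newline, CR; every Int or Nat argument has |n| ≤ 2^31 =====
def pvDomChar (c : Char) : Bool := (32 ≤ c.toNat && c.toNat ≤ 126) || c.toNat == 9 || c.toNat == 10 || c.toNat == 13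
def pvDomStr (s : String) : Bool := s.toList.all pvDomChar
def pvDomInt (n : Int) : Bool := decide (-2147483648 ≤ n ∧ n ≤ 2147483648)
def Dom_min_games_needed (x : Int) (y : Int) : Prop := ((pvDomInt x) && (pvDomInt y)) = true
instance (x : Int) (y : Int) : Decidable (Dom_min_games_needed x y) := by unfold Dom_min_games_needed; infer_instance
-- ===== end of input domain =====

-- B replaces A's binary search with a closed-form integer-ceiling solve; same return value wherever A returns.

-- ===== PORT A =====
-- the while loop of A, state (left, right, answer); terminates because right+1-left shrinks
def pvLoopA (x y z : Int) (left right answer : Int) : Int :=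
  if _h : left ≤ right then
    let mid := PySem.Int.floordiv (left + right) 2
    let new_z := PySem.Int.floordiv ((y + mid) * 100) (x + mid)
    if new_z > z then pvLoopA x y z left (mid - 1) mid
    else pvLoopA x y z (mid + 1) right answer
  else answer
termination_by (right + 1 - left).toNat
decreasing_by
  · have := PySem.Int.floordiv_two_mid_bounds _h
    omega
  · have := PySem.Int.floordiv_two_mid_bounds _h
    omega

def min_games_needed (x : Int) (y : Int) : Int :=
  let z := PySem.Int.floordiv (y * 100) x
  if z ≥ 99 then -1
  else pvLoopA x y z 1 x (-1)

-- ===== PORT B =====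
def min_games_needed_alt (x : Int) (y : Int) : Int :=
  let z := PySem.Int.floordiv (y * 100) x
  if z ≥ 99 then -1
  else
    let need := (z + 1) * x - 100 * y
    let m := max 1 (-(PySem.Int.floordiv (-need) (99 - z)))
    if m ≤ x then m else -1

-- ===== PRECONDITION & SPEC =====
-- Pre_ excludes exactly x = 0, where A raises ZeroDivisionError.
def Pre_min_games_needed (x : Int) (y : Int) : Prop := x ≠ 0
instance (x : Int) (y : Int) : Decidable (Pre_min_games_needed x y) := by unfold Pre_min_games_needed; infer_instance
def pvWitness_min_games_needed : Int × Int := (10, 8)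

def Spec_min_games_needed (x : Int) (y : Int) (out : Int) : Prop := out = min_games_needed_alt x y
instance (x : Int) (y : Int) (out : Int) : Decidable (Spec_min_games_needed x y out) := by unfold Spec_min_games_needed; infer_instance

-- ===== CLAIM (what is proved, stated in full; the proofs are below) =====
def Claim_equal_min_games_needed : Prop := ∀ (x : Int) (y : Int), Dom_min_games_needed x y → Pre_min_games_needed x y → Spec_min_games_needed x y (min_games_needed x y)

-- ===== LEMMAS AND PROOFS =====

-- For x ≥ 1 and 1 ≤ m, the loop's test new_z > z is exactly the threshold test t ≤ m,
-- where t = ceil(need / (99-z)) as computed by B.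
theorem pv_pred_iff (x y z m : Int) (hx : 1 ≤ x) (hm : 1 ≤ m) (hz : z ≤ 98) :
    (PySem.Int.floordiv ((y + m) * 100) (x + m) > z ↔
      -(PySem.Int.floordiv (-((z + 1) * x - 100 * y)) (99 - z)) ≤ m) := by
  have hxm : (0:Int) < x + m := by omega
  have hd : (0:Int) < 99 - z := by omega
  have h1 : PySem.Int.floordiv ((y + m) * 100) (x + m) > z ↔
      (z + 1) * (x + m) ≤ (y + m) * 100 := by
    constructor
    · intro h
      exact (PySem.Int.le_floordiv_iff_mul_le hxm).mp (by omega)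
    · intro h
      have := (PySem.Int.le_floordiv_iff_mul_le hxm).mpr h
      omega
  rw [h1]
  set t := -(PySem.Int.floordiv (-((z + 1) * x - 100 * y)) (99 - z)) with ht
  have h2 : (t - 1) * (99 - z) < (z + 1) * x - 100 * y ∧
      (z + 1) * x - 100 * y ≤ t * (99 - z) :=
    (PySem.Int.neg_floordiv_neg_eq_iff_of_pos hd).mp ht.symm
  constructor
  · intro h
    by_contra hlt
    push_neg at hlt
    have hmt : m ≤ t - 1 := by omega
    have := mul_le_mul_of_nonneg_right hmt (by omega : (0:Int) ≤ 99 - z)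
    nlinarith
  · intro h
    have := mul_le_mul_of_nonneg_right h (by omega : (0:Int) ≤ 99 - z)
    nlinarith

-- The binary search on the threshold predicate returns max 1 t clamped to [1,x], else -1.
theorem pv_loop_char (x y z t : Int) (hx : 1 ≤ x)
    (hP : ∀ m, 1 ≤ m → m ≤ x →
      (PySem.Int.floordiv ((y + m) * 100) (x + m) > z ↔ t ≤ m)) :
    ∀ n (l r ans : Int), (r + 1 - l).toNat ≤ n → 1 ≤ l → r ≤ x → l ≤ r + 1 →
      (l ≤ t ∨ l = 1) →
      ((ans = r + 1 ∧ t ≤ r + 1 ∧ r + 1 ≤ x) ∨ (ans = -1 ∧ r = x)) →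
      pvLoopA x y z l r ans = (if max 1 t ≤ x then max 1 t else -1) := by
  intro n
  induction n with
  | zero =>
    intro l r ans hn hl hr hlr hI3 hI4
    have hlr' : r < l := by omega
    rw [pvLoopA]
    simp only [dif_neg (by omega : ¬ l ≤ r)]
    rcases hI4 with ⟨ha, htr, hrx⟩ | ⟨ha, hrx⟩
    · have : l = r + 1 := by omega
      rcases hI3 with h | h
      · have ht1 : t = r + 1 := by omega
        rw [ha, ht1]
        rw [if_pos (by omega : max 1 (r+1) ≤ x)]
        omega
      · have : r + 1 = 1 := by omega
        rw [ha]
        rw [if_pos (by omega : max 1 t ≤ x)]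
        omega
    · have : l = x + 1 := by omega
      rcases hI3 with h | h
      · rw [ha, if_neg (by omega : ¬ max 1 t ≤ x)]
      · omega
  | succ n ih =>
    intro l r ans hn hl hr hlr hI3 hI4
    rw [pvLoopA]
    by_cases hle : l ≤ r
    · simp only [dif_pos hle]
      have hmid := PySem.Int.floordiv_two_mid_bounds hle
      set mid := PySem.Int.floordiv (l + r) 2 with hmd
      have hm1 : 1 ≤ mid := by omega
      have hmx : mid ≤ x := by omega
      by_cases hp : PySem.Int.floordiv ((y + mid) * 100) (x + mid) > z
      · rw [if_pos hp]
        have htm : t ≤ mid := (hP mid hm1 hmx).mp hp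
        exact ih l (mid - 1) mid (by omega) hl (by omega) (by omega) hI3
          (Or.inl ⟨by omega, by omega, by omega⟩)
      · rw [if_neg hp]
        have htm : ¬ t ≤ mid := fun h => hp ((hP mid hm1 hmx).mpr h)
        exact ih (mid + 1) r ans (by omega) (by omega) hr (by omega)
          (Or.inl (by omega)) hI4
    · simp only [dif_neg hle]
      rcases hI4 with ⟨ha, htr, hrx⟩ | ⟨ha, hrx⟩
      · have : l = r + 1 := by omega
        rcases hI3 with h | h
        · have ht1 : t = r + 1 := by omega
          rw [ha, ht1, if_pos (by omega : max 1 (r+1) ≤ x)]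
          omega
        · rw [ha, if_pos (by omega : max 1 t ≤ x)]
          omega
      · have : l = x + 1 := by omega
        rcases hI3 with h | h
        · rw [ha, if_neg (by omega : ¬ max 1 t ≤ x)]
        · omega

-- ===== VERDICT (by name: the statement is the Claim_ definition above) =====
theorem min_games_needed_spec : Claim_equal_min_games_needed := by
  intro x y _ hx
  have hx0 : x ≠ 0 := hx
  unfold Spec_min_games_needed min_games_needed min_games_needed_alt
  set z := PySem.Int.floordiv (y * 100) x with hz
  by_cases hz99 : z ≥ 99
  · simp [hz99]
  · simp only [if_neg hz99]
    set t := -(PySem.Int.floordiv (-((z + 1) * x - 100 * y)) (99 - z)) with ht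
    by_cases hxneg : x < 0
    · -- x < 0: the loop body never runs, and max 1 t > x, so both sides are -1
      rw [pvLoopA]
      simp only [dif_neg (by omega : ¬ (1:Int) ≤ x)]
      rw [if_neg (by omega : ¬ max 1 t ≤ x)]
    · have hx1 : (1:Int) ≤ x := by omega
      rw [pv_loop_char x y z t hx1
        (fun m hm hmx => by rw [ht]; exact pv_pred_iff x y z m hx1 hm (by omega))
        (x + 1 - 1).toNat 1 x (-1) (by omega) (by omega) le_rfl (by omega)
        (Or.inr rfl) (Or.inr ⟨rfl, rfl⟩)]
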